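-- pv_equiv track=rewrite | github.com/rameshwarsingh11/data-structure-practice | find_split_words.py | word_split
-- ===== SOURCE A (Python) =====
-- def word_split(phrase, list_of_words, output=None):
--     # base case
--     if output is None:
--         output = []
--
--     for word in list_of_words:
--         if phrase.startswith(word):
--             output.append(word)
--
--             return word_split(phrase[len(word):], list_of_words, output)
--
--     return output
-- ===== SOURCE B (Python) =====
-- def word_split(phrase, list_of_words, output=None):
--     # Iterative: collect the greedy first-match pieces in a fresh list,
--     # then extend the caller's accumulator (mutates `output` like A does).
--     pieces = []
--     while True:
--         match = next((w for w in list_of_words if phrase.startswith(w)), None)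
--         if match is None:
--             break
--         pieces.append(match)
--         phrase = phrase[len(match):]
--     if output is None:
--         output = []
--     output.extend(pieces)
--     return output
-- ===== Notes on version B (the rewrite author's own statement) =====
-- stated objective: idiomatic
-- what changed: Replaces A's tail recursion threading an accumulator through every call with a plain while-loop that collects the pieces (first match found via next(...)) and extends the output list once at the end.
import Mathlib
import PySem

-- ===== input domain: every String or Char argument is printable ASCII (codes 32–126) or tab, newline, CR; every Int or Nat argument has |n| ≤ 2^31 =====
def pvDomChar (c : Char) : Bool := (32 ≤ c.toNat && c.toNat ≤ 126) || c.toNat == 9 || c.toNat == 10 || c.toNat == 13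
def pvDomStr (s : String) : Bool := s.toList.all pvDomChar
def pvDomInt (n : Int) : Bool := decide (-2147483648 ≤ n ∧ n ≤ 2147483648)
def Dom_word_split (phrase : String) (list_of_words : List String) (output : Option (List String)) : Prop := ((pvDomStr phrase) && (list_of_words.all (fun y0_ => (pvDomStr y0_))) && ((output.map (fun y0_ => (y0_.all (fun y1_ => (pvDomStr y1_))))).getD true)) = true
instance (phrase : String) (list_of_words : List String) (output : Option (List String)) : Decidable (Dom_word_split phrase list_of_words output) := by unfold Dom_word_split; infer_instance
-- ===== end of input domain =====

-- ===== PORT A =====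
-- One honest line: B replaces A's accumulator-threading tail recursion with an
-- iterative collect-then-extend loop; both mutate the caller's `output` list in
-- place (A appends piecewise, B extends once) — equivalence here is about the
-- return value.
-- A's for-loop over list_of_words: first word that phrase startswith, if any.
def wsA_scan (phrase : List Char) (words : List String) : Option String :=
  match words with
  | [] => none
  | w :: rest =>
      if PySem.Chars.startswith phrase w.toList then some w else wsA_scan phrase rest

-- A's recursion. Fuel makes the port total; whenever "" ∉ list_of_words (Pre_)
-- every matched word is nonempty, so phrase.length + 1 steps always suffice and
-- the fuel is never exhausted inside Pre_. phrase[len(word):] is an exact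
-- nonnegative slice = drop. output.append(word) then recurse = acc ++ [w].
def wsA_go (fuel : Nat) (phrase : List Char) (words : List String) (output : List String) : List String :=
  match fuel with
  | 0 => output
  | Nat.succ f =>
      match wsA_scan phrase words with
      | some w => wsA_go f (phrase.drop w.toList.length) words (output ++ [w])
      | none => output

def word_split (phrase : String) (list_of_words : List String) (output : Option (List String)) : List String :=
  wsA_go (phrase.toList.length + 1) phrase.toList list_of_words (output.getD [])

-- ===== PORT B =====
-- B's while-loop: build the list of pieces (next(...) = List.find?), fuelled
-- exactly like A's port; then `output.extend(pieces)` = append once.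
def wsB_pieces (fuel : Nat) (phrase : List Char) (words : List String) : List String :=
  match fuel with
  | 0 => []
  | Nat.succ f =>
      match words.find? (fun w => PySem.Chars.startswith phrase w.toList) with
      | some w => w :: wsB_pieces f (phrase.drop w.toList.length) words
      | none => []

def word_split_alt (phrase : String) (list_of_words : List String) (output : Option (List String)) : List String :=
  (output.getD []) ++ wsB_pieces (phrase.toList.length + 1) phrase.toList list_of_words

-- ===== PRECONDITION & SPEC =====
-- Pre_ excludes exactly the inputs where Python A never returns: if "" is in
-- list_of_words some word matches at every step ("" matches everything), so A
-- recurses forever (RecursionError); Python B loops forever there too.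
def Pre_word_split (phrase : String) (list_of_words : List String) (output : Option (List String)) : Prop :=
  "" ∉ list_of_words

instance (phrase : String) (list_of_words : List String) (output : Option (List String)) : Decidable (Pre_word_split phrase list_of_words output) := by unfold Pre_word_split; infer_instance

def pvWitness_word_split : String × List String × Option (List String) :=
  ("catdogcat", ["cat", "dog"], none)

def Spec_word_split (phrase : String) (list_of_words : List String) (output : Option (List String)) (out : List String) : Prop := out = word_split_alt phrase list_of_words output
instance (phrase : String) (list_of_words : List String) (output : Option (List String)) (out : List String) : Decidable (Spec_word_split phrase list_of_words output out) := by unfold Spec_word_split; infer_instance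

-- ===== CLAIM (what is proved, stated in full; the proofs are below) =====
def Claim_equal_word_split : Prop := ∀ (phrase : String) (list_of_words : List String) (output : Option (List String)), Dom_word_split phrase list_of_words output → Pre_word_split phrase list_of_words output → Spec_word_split phrase list_of_words output (word_split phrase list_of_words output)

-- ===== LEMMAS AND PROOFS =====
-- A's for-loop computes the first match, i.e. List.find? of the predicate.
theorem wsA_scan_eq_find (phrase : List Char) (words : List String) :
    wsA_scan phrase words = words.find? (fun w => PySem.Chars.startswith phrase w.toList) := by
  induction words with
  | nil => rfl
  | cons w rest ih =>
      simp [wsA_scan, List.find?, ih]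
      by_cases h : PySem.Chars.startswith phrase w.toList <;> simp [h]

-- The accumulator-threading loop equals "accumulator ++ pieces".
theorem wsA_go_eq (fuel : Nat) (phrase : List Char) (words : List String) (output : List String) :
    wsA_go fuel phrase words output = output ++ wsB_pieces fuel phrase words := by
  induction fuel generalizing phrase output with
  | zero => simp [wsA_go, wsB_pieces]
  | succ f ih =>
      rw [wsA_go, wsB_pieces, wsA_scan_eq_find]
      cases words.find? (fun w => PySem.Chars.startswith phrase w.toList) with
      | none => simp
      | some w => simp [ih]

-- ===== VERDICT (by name: the statement is the Claim_ definition above) =====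
theorem word_split_spec : Claim_equal_word_split := by
  intro phrase list_of_words output _ _
  unfold Spec_word_split word_split word_split_alt
  exact wsA_go_eq _ _ _ _
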